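-- pv_equiv track=rewrite | github.com/pooryork/python_summer2019 | Блок 6/ex6.2-24.py | f
-- ===== SOURCE A (Python) =====
-- def f(a):
--
--     i = 0;
--     j = 0;
--     n = len(a)//2;
--     while (i < len(a)//2 and j<n):
--         if (a[i] % 3 == 0):
--             a.remove(a[i]);
--         else:
--             i+=1;
--         j+=1;
--
--     return a;
-- ===== SOURCE B (Python) =====
-- def f(a):
--     n = len(a) // 2
--     return [x for x in a[:n] if x % 3 != 0] + a[n:]
-- ===== Notes on version B (the rewrite author's own statement) =====
-- stated objective: simpler
-- what changed: Replaces the while-loop that repeatedly calls list.remove (quadratic in the worst case) with a single filtering comprehension over the first half plus the untouched tail; the loop's first condition is provably redundant.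
import Mathlib
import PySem

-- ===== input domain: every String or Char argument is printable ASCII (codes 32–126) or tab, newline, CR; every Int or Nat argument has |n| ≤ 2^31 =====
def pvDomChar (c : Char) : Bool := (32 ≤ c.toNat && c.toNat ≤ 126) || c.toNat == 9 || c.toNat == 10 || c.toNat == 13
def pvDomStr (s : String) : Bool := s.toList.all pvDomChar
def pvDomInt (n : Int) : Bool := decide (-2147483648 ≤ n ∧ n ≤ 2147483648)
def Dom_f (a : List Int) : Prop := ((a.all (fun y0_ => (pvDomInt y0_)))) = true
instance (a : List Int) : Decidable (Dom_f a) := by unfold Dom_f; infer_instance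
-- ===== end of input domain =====

-- B replaces A's remove-in-a-while-loop with one filtering pass over the first
-- half plus the untouched tail (objective: simpler; not claimed faster).
-- NOTE: Python A mutates its argument in place; the equivalence proved here is
-- about the RETURN value only (B leaves the argument untouched).

-- ===== PORT A =====
-- The while loop: j increases by 1 every iteration and the guard requires j < n,
-- so n.toNat iterations of fuel always suffice (fuel never runs out; see lemmas).
-- a.remove(a[i]) : a[i] via pyGet?, remove via remove?; the none branches are
-- unreachable (guard gives 0 ≤ i < len a), kept only to make the port total.
def fLoopA (fuel : Nat) (a : List Int) (i j n : Int) : List Int :=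
  match fuel with
  | 0 => a
  | fuel + 1 =>
    if i < (a.length : Int) / 2 ∧ j < n then
      if (match PySem.List.pyGet? a i with | some v => v % 3 == 0 | none => false) then
        match PySem.List.pyGet? a i with
        | some v =>
          match PySem.List.remove? a v with
          | some a' => fLoopA fuel a' i (j + 1) n
          | none => a      -- unreachable
        | none => a        -- unreachable
      else
        fLoopA fuel a (i + 1) (j + 1) n
    else a

def f (a : List Int) : List Int :=
  fLoopA ((a.length : Int) / 2).toNat a 0 0 ((a.length : Int) / 2)

-- ===== PORT B =====
def f_alt (a : List Int) : List Int :=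
  ((a.take (a.length / 2)).filter (fun x => x % 3 != 0)) ++ a.drop (a.length / 2)

-- ===== PRECONDITION & SPEC =====
def Spec_f (a : List Int) (out : List Int) : Prop := out = f_alt a
instance (a : List Int) (out : List Int) : Decidable (Spec_f a out) := by unfold Spec_f; infer_instance

-- ===== CLAIM (what is proved, stated in full; the proofs are below) =====
def Claim_equal_f : Prop := ∀ (a : List Int), Dom_f a → Spec_f a (f a)

-- ===== LEMMAS AND PROOFS =====

-- remove? deletes the first occurrence; when v is absent from the prefix it
-- deletes exactly the head of the suffix.
lemma pvRemoveAppend (pre rest : List Int) (v : Int) (h : v ∉ pre) :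
    PySem.List.remove? (pre ++ v :: rest) v = some (pre ++ rest) := by
  induction pre with
  | nil => simp
  | cons p ps ihp =>
    have hne : p ≠ v := by intro he; exact h (by simp [he])
    rw [List.cons_append, PySem.List.remove?_cons_of_ne _ hne,
        ihp (fun hm => h (by simp [hm]))]
    rfl

-- Loop invariant: the list is (kept prefix `pre`, all non-multiples of 3) ++
-- unexamined `rest`; i = |pre|; r elements removed so far; j = i + r;
-- n = L0/2 for the original length L0 = |pre| + |rest| + r.
lemma fLoopA_invariant (fuel : Nat) :
    ∀ (pre rest : List Int) (r L0 : Nat),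
      (∀ x ∈ pre, x % 3 ≠ 0) →
      pre.length + rest.length + r = L0 →
      ((L0 : Int) / 2 - (pre.length + r : Nat)).toNat ≤ fuel →
      fLoopA fuel (pre ++ rest) (pre.length : Nat) ((pre.length + r : Nat) : Int) ((L0 : Int) / 2)
        = pre ++ (rest.take ((L0 : Int) / 2 - (pre.length + r : Nat)).toNat).filter (fun x => x % 3 != 0)
              ++ rest.drop ((L0 : Int) / 2 - (pre.length + r : Nat)).toNat := by
  induction fuel with
  | zero =>
    intro pre rest r L0 hpre hlen hfuel
    have h0 : ((L0 : Int) / 2 - ((pre.length : Int) + (r : Int))).toNat = 0 := by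
      push_cast at hfuel; omega
    simp [fLoopA, h0]
  | succ fuel ih =>
    intro pre rest r L0 hpre hlen hfuel
    by_cases hj : ((pre.length + r : Nat) : Int) < (L0 : Int) / 2
    · -- guard holds; rest cannot be empty
      have hrest : rest ≠ [] := by
        intro h; subst h; simp at hlen; omega
      obtain ⟨v, rest', rfl⟩ := List.exists_cons_of_ne_nil hrest
      simp only [List.length_cons] at hlen
      have hi : ((pre.length : Nat) : Int) < ((pre ++ v :: rest').length : Int) / 2 := by
        simp only [List.length_append, List.length_cons]
        push_cast at hj ⊢; omega
      have hget : PySem.List.pyGet? (pre ++ v :: rest') (pre.length : Nat)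
          = some v := PySem.List.pyGet?_append_length pre rest' v
      have hk : ((L0 : Int) / 2 - (pre.length + r : Nat)).toNat
          = (((L0 : Int) / 2 - (pre.length + r + 1 : Nat)).toNat) + 1 := by omega
      by_cases hv : v % 3 = 0
      · -- removal step: v ∉ pre, so remove? deletes exactly the head of rest
        have hvpre : v ∉ pre := fun hm => hpre v hm hv
        have hrem : PySem.List.remove? (pre ++ v :: rest') v = some (pre ++ rest') :=
          pvRemoveAppend pre rest' v hvpre
        have hrec := ih pre rest' (r + 1) L0 hpre (by omega) (by omega)
        rw [fLoopA]
        simp only [hget, hv]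
        have harith : ((pre.length + r : Nat) : Int) + 1 = ((pre.length + (r + 1) : Nat) : Int) := by
          push_cast; ring
        rw [if_pos ⟨hi, hj⟩, if_pos (by simp), hrem]
        simp only [harith, hrec, hk, List.take_succ_cons, List.drop_succ_cons, List.filter_cons]
        simp [hv, add_assoc]
      · -- keep step: i advances, v moves into the kept prefix
        have hpre' : ∀ x ∈ pre ++ [v], x % 3 ≠ 0 := by
          intro x hx
          rcases List.mem_append.mp hx with h | h
          · exact hpre x h
          · simp at h; subst h; exact hv
        have hrec := ih (pre ++ [v]) rest' r L0 hpre'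
          (by simp at hlen ⊢; omega) (by simp; omega)
        rw [fLoopA]
        simp only [hget]
        rw [if_pos ⟨hi, hj⟩, if_neg (by simp [hv])]
        have harith1 : ((pre.length : Nat) : Int) + 1 = (((pre ++ [v]).length : Nat) : Int) := by
          simp
        have harith2 : ((pre.length + r : Nat) : Int) + 1 = (((pre ++ [v]).length + r : Nat) : Int) := by
          simp; ring
        rw [harith1, harith2, List.append_cons pre v rest', hrec]
        have hk' : ((L0 : Int) / 2 - ((pre ++ [v]).length + r : Nat)).toNat
            = ((L0 : Int) / 2 - (pre.length + r + 1 : Nat)).toNat := by simp; omega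
        rw [hk', hk]
        simp [hv]
    · -- guard false: j ≥ n, loop stops, nothing more is taken
      have h0 : ((L0 : Int) / 2 - ((pre.length : Int) + (r : Int))).toNat = 0 := by
        push_cast at hj; omega
      rw [fLoopA, if_neg (by intro h; exact hj h.2)]
      simp [h0]

-- ===== VERDICT (by name: the statement is the Claim_ definition above) =====
theorem f_spec : Claim_equal_f := by
  intro a _
  unfold Spec_f f f_alt
  have h := fLoopA_invariant ((a.length : Int) / 2).toNat ([] : List Int) a 0 a.length
    (by simp) (by simp) (by simp)
  have hto : ((a.length : Int) / 2 - ((0 : Nat) + (0 : Nat) : Nat)).toNat = a.length / 2 := by omega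
  simpa [hto] using h
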